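-- pv_equiv track=rewrite | github.com/mirkosaenz/Teoria-De-Algoritmos | Guia/03. Backtracking/guia/pd/sub_max_sum.py | obtener_sumas_indice
-- ===== SOURCE A (Python) =====
-- def obtener_sumas_indice(arr):
--     sumas = [0]*len(arr)
--     inicio = [0]*len(arr)
--
--     for i in range(len(arr)):
--         suma_max = 0
--         indice_izq_min = i
--         indice_izq = i
--         indice_der = i
--
--         while indice_izq >= 0:
--             suma = sum(arr[indice_izq:indice_der+1])
--
--             if suma > suma_max:
--                 suma_max = suma
--                 indice_izq_min = indice_izq
--
--             indice_izq -= 1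
--
--         sumas[i] = suma_max
--         inicio[i] = indice_izq_min
--
--     return sumas, inicio
-- ===== SOURCE B (Python) =====
-- def obtener_sumas_indice(arr):
--     sumas = []
--     inicio = []
--     cur = 0
--     start = 0
--     for i, x in enumerate(arr):
--         if cur > 0:
--             cur += x
--         else:
--             cur = x
--             start = i
--         sumas.append(max(cur, 0))
--         inicio.append(start if cur > 0 else i)
--     return sumas, inicio
-- ===== Notes on version B (the rewrite author's own statement) =====
-- stated objective: faster
-- what changed: Replaced the per-index rescan of all left endpoints with slice re-summing (O(n^3)) by a single Kadane-style pass that carries the best sum ending at the previous index and its start.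
import Mathlib
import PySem

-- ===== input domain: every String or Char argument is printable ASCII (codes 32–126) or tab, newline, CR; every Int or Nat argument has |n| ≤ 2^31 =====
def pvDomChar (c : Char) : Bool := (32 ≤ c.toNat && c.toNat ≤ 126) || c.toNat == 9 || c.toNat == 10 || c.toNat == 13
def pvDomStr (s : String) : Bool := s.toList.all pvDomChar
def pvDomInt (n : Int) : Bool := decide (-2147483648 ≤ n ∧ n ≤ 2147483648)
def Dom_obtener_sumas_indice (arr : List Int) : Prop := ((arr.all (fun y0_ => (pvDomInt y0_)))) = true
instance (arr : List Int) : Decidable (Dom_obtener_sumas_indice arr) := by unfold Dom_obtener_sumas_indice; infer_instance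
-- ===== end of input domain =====

-- B replaces A's cubic rescan of every left endpoint (re-summing each slice) by a
-- single Kadane-style pass carrying (best sum ending here, its start index); same return value.

-- ===== PORT A =====
-- inner while-loop step: suma = sum(arr[j:i+1]); if suma > suma_max: update
def aStep (arr : List Int) (i j : Nat) (st : Int × Int) : Int × Int :=
  let suma := (PySem.List.slice arr (some (j : Int)) (some ((i : Int) + 1))).sum
  if suma > st.1 then (suma, (j : Int)) else st

-- the while-loop: indice_izq counts down from i to 0
def aWhile (arr : List Int) (i : Nat) : Nat → (Int × Int) → Int × Int
  | 0, st => aStep arr i 0 st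
  | j+1, st => aWhile arr i j (aStep arr i (j+1) st)

def obtener_sumas_indice (arr : List Int) : List Int × List Int :=
  let n := arr.length
  (List.range n).foldl
    (fun st i =>
      let r := aWhile arr i i (0, (i : Int))
      (st.1.set i r.1, st.2.set i r.2))
    (List.replicate n 0, List.replicate n 0)

-- ===== PORT B =====
-- B's loop: carries (cur, start); appends max(cur,0) and (start if cur>0 else i)
def bLoop (cur start : Int) (i : Nat) : List Int → List Int × List Int
  | [] => ([], [])
  | x :: rest =>
      let cur' := if cur > 0 then cur + x else x
      let start' := if cur > 0 then start else (i : Int)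
      let r := bLoop cur' start' (i+1) rest
      ((max cur' 0) :: r.1, (if cur' > 0 then start' else (i : Int)) :: r.2)

def obtener_sumas_indice_alt (arr : List Int) : List Int × List Int :=
  bLoop 0 0 0 arr

-- ===== PRECONDITION & SPEC =====
def Spec_obtener_sumas_indice (arr : List Int) (out : List Int × List Int) : Prop := out = obtener_sumas_indice_alt arr
instance (arr : List Int) (out : List Int × List Int) : Decidable (Spec_obtener_sumas_indice arr out) := by unfold Spec_obtener_sumas_indice; infer_instance

-- ===== CLAIM (what is proved, stated in full; the proofs are below) =====
def Claim_equal_obtener_sumas_indice : Prop := ∀ (arr : List Int), Dom_obtener_sumas_indice arr → Spec_obtener_sumas_indice arr (obtener_sumas_indice arr)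

-- ===== LEMMAS AND PROOFS =====

-- S i k = sum(arr[k:i+1]), exactly the quantity A's inner loop computes
def pvS (arr : List Int) (i k : Nat) : Int :=
  (PySem.List.slice arr (some (k : Int)) (some ((i : Int) + 1))).sum

-- best (value, largest argmax as Int) of pvS arr i k over k <= j
def pvBest (arr : List Int) (i : Nat) : Nat → Int × Int
  | 0 => (pvS arr i 0, 0)
  | j+1 =>
      let p := pvBest arr i j
      if pvS arr i (j+1) ≥ p.1 then (pvS arr i (j+1), ((j : Int) + 1)) else p

def pvK (arr : List Int) (i : Nat) : Int × Int := pvBest arr i i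

-- B's state transition, as a function
def pvStepK (p : Int × Int) (x : Int) (i : Nat) : Int × Int :=
  if p.1 > 0 then (p.1 + x, p.2) else (x, (i : Int))

lemma aStep_eq (arr : List Int) (i j : Nat) (st : Int × Int) :
    aStep arr i j st = if pvS arr i j > st.1 then (pvS arr i j, (j : Int)) else st := rfl

lemma pvS_eq_takes (arr : List Int) (i k : Nat) :
    pvS arr i k = (arr.take (i+1)).sum - (arr.take (min k (i+1))).sum := by
  have h : ((i : Int) + 1) = ((i + 1 : Nat) : Int) := by push_cast; ring
  unfold pvS
  rw [h, PySem.List.slice_natCast]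
  rcases le_or_gt k (i+1) with hk | hk
  · have h1 : (arr.drop k).take (i + 1 - k) = (arr.take (i+1)).drop k := by
      rw [List.drop_take]
    rw [h1, min_eq_left hk]
    have := List.sum_take_add_sum_drop (arr.take (i+1)) k
    have htt : (arr.take (i+1)).take k = arr.take (min k (i+1)) := by
      rw [List.take_take]
    rw [htt, min_eq_left hk] at this
    omega
  · have h0 : i + 1 - k = 0 := by omega
    rw [h0, min_eq_right (by omega : i + 1 ≤ k)]
    simp

lemma pv_getD_eq (arr : List Int) (i : Nat) (hi : i < arr.length) :
    arr.getD i 0 = arr[i] := by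
  simp [List.getD_eq_getElem?_getD, List.getElem?_eq_getElem hi]

lemma pv_sum_take_succ (arr : List Int) (i : Nat) (hi : i < arr.length) :
    (arr.take (i+1)).sum = (arr.take i).sum + arr.getD i 0 := by
  have h : arr.take (i+1) = arr.take i ++ [arr.getD i 0] := by
    rw [List.take_add_one]
    simp [List.getElem?_eq_getElem hi]
  rw [h]
  simp

-- single-element slice: S i i = arr[i]
lemma pvS_self (arr : List Int) (i : Nat) (hi : i < arr.length) :
    pvS arr i i = arr.getD i 0 := by
  rw [pvS_eq_takes, min_eq_left (by omega), pv_sum_take_succ arr i hi]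
  ring

-- recurrence: for k ≤ i, S (i+1) k = S i k + arr[i+1]
lemma pvS_succ (arr : List Int) (i k : Nat) (hk : k ≤ i) (hi : i + 1 < arr.length) :
    pvS arr (i+1) k = pvS arr i k + arr.getD (i+1) 0 := by
  rw [pvS_eq_takes, pvS_eq_takes, min_eq_left (by omega), min_eq_left (by omega),
    pv_sum_take_succ arr (i+1) hi]
  ring

-- characterization of A's inner while-loop as "beat st.1 by the best over k ≤ j"
lemma aWhile_char (arr : List Int) (i : Nat) :
    ∀ (j : Nat) (st : Int × Int),
      aWhile arr i j st =
        (if (pvBest arr i j).1 > st.1 then pvBest arr i j else st) := by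
  intro j
  induction j with
  | zero =>
      intro st
      show aStep arr i 0 st = _
      rw [aStep_eq]
      simp [pvBest]
  | succ j ih =>
      intro st
      show aWhile arr i j (aStep arr i (j+1) st) = _
      rw [ih, aStep_eq]
      simp only [pvBest]
      have hcast : (((j+1 : Nat)) : Int) = (j : Int) + 1 := by push_cast; ring
      rw [hcast]
      set v := pvS arr i (j+1) with hv
      set p := pvBest arr i j with hp
      by_cases h1 : v > st.1
      · rw [if_pos h1]
        by_cases h2 : v ≥ p.1
        · rw [if_pos h2, if_neg (show ¬ p.1 > ((v, (j:Int)+1) : Int × Int).1 by simp; omega),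
            if_pos (show ((v, (j:Int)+1) : Int × Int).1 > st.1 from h1)]
        · rw [if_neg h2, if_pos (show p.1 > ((v, (j:Int)+1) : Int × Int).1 by simp; omega),
            if_pos (show p.1 > st.1 by omega)]
      · rw [if_neg h1]
        by_cases h2 : v ≥ p.1
        · rw [if_pos h2, if_neg (show ¬ p.1 > st.1 by omega),
            if_neg (show ¬ ((v, (j:Int)+1) : Int × Int).1 > st.1 from h1)]
        · rw [if_neg h2]

-- pvBest shifts by arr[i+1] when the right endpoint moves from i to i+1
lemma pvBest_shift (arr : List Int) (i : Nat) (hi : i + 1 < arr.length) :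
    ∀ j, j ≤ i →
      pvBest arr (i+1) j = ((pvBest arr i j).1 + arr.getD (i+1) 0, (pvBest arr i j).2) := by
  intro j
  induction j with
  | zero =>
      intro _
      simp only [pvBest]
      rw [pvS_succ arr i 0 (by omega) hi]
  | succ j ih =>
      intro hj
      have hj' : j ≤ i := by omega
      simp only [pvBest, ih hj']
      rw [pvS_succ arr i (j+1) (by omega) hi]
      by_cases h : pvS arr i (j+1) ≥ (pvBest arr i j).1
      · rw [if_pos (by simpa using (by omega : pvS arr i (j+1) + arr.getD (i+1) 0 ≥ (pvBest arr i j).1 + arr.getD (i+1) 0)), if_pos h]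
      · rw [if_neg (by simpa using (by omega : ¬ pvS arr i (j+1) + arr.getD (i+1) 0 ≥ (pvBest arr i j).1 + arr.getD (i+1) 0)), if_neg h]

-- Kadane step: pvK satisfies B's recurrence
lemma pvK_succ (arr : List Int) (i : Nat) (hi : i + 1 < arr.length) :
    pvK arr (i+1) = pvStepK (pvK arr i) (arr.getD (i+1) 0) (i+1) := by
  unfold pvK pvStepK
  show pvBest arr (i+1) (i+1) = _
  simp only [pvBest]
  rw [pvBest_shift arr i hi i le_rfl, pvS_self arr (i+1) hi]
  set p := pvBest arr i i with hp
  set x := arr.getD (i+1) 0 with hx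
  by_cases h : p.1 > 0
  · rw [if_neg (by simp; omega), if_pos h]
  · rw [if_pos (by simp; omega), if_neg h]
    push_cast
    rfl

lemma pvK_zero (arr : List Int) (h : 0 < arr.length) :
    pvK arr 0 = (arr.getD 0 0, 0) := by
  unfold pvK
  simp only [pvBest]
  rw [pvS_self arr 0 h]

-- the two per-index output values
def pvOutS (arr : List Int) (t : Nat) : Int := max (pvK arr t).1 0
def pvOutI (arr : List Int) (t : Nat) : Int :=
  if (pvK arr t).1 > 0 then (pvK arr t).2 else (t : Int)

-- B's loop produces exactly the per-index outputs
lemma bLoop_eq (arr : List Int) :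
    ∀ (rest : List Int) (i : Nat) (cur start : Int),
      rest = arr.drop i →
      (i < arr.length → pvStepK (cur, start) (arr.getD i 0) i = pvK arr i) →
      bLoop cur start i rest =
        ((List.range' i rest.length).map (pvOutS arr),
         (List.range' i rest.length).map (pvOutI arr)) := by
  intro rest
  induction rest with
  | nil => intro i cur start _ _; simp [bLoop]
  | cons x rest ih =>
      intro i cur start hdrop hst
      have hi : i < arr.length := by
        by_contra h
        rw [List.drop_eq_nil_of_le (by omega)] at hdrop
        exact (List.cons_ne_nil x rest) hdrop
      have hd : arr.drop i = arr[i] :: arr.drop (i+1) := List.drop_eq_getElem_cons hi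
      rw [hd] at hdrop
      obtain ⟨hx, hrest⟩ := List.cons_eq_cons.mp hdrop
      have hxg : x = arr.getD i 0 := by rw [hx, pv_getD_eq arr i hi]
      have hK : pvStepK (cur, start) x i = pvK arr i := by rw [hxg]; exact hst hi
      simp only [pvStepK] at hK
      simp only [bLoop]
      have hcur : (if cur > 0 then cur + x else x) = (pvK arr i).1 := by
        by_cases h : cur > 0
        · rw [if_pos h] at hK ⊢; rw [← hK]
        · rw [if_neg h] at hK ⊢; rw [← hK]
      have hstart : (if cur > 0 then start else ((i:Nat) : Int)) = (pvK arr i).2 := by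
        by_cases h : cur > 0
        · rw [if_pos h] at hK ⊢; rw [← hK]
        · rw [if_neg h] at hK ⊢; rw [← hK]
      have hnext : (i+1) < arr.length →
          pvStepK ((pvK arr i).1, (pvK arr i).2) (arr.getD (i+1) 0) (i+1) = pvK arr (i+1) := by
        intro h
        rw [Prod.mk.eta]
        exact (pvK_succ arr i h).symm
      rw [hcur, hstart, ih (i+1) (pvK arr i).1 (pvK arr i).2 hrest hnext]
      simp only [List.length_cons, List.range'_succ, List.map_cons]
      rfl

-- splitting the pair-state fold of A into two independent folds
lemma foldl_pair_split (l : List Nat) (f g : Nat → Int) :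
    ∀ (A0 B0 : List Int),
      l.foldl (fun (st : List Int × List Int) i => (st.1.set i (f i), st.2.set i (g i))) (A0, B0) =
        (l.foldl (fun a i => a.set i (f i)) A0, l.foldl (fun b i => b.set i (g i)) B0) := by
  induction l with
  | nil => intro A0 B0; rfl
  | cons x xs ih => intro A0 B0; simp only [List.foldl_cons]; exact ih _ _

-- a fold that sets index i to f i for every i < n turns init into map f ++ leftover
lemma foldl_set_range (f : Nat → Int) :
    ∀ (n : Nat) (init : List Int), n ≤ init.length →
      (List.range n).foldl (fun l i => l.set i (f i)) init =
        (List.range n).map f ++ init.drop n := by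
  intro n
  induction n with
  | zero => intro init _; simp
  | succ n ih =>
      intro init hlen
      rw [List.range_succ, List.foldl_append, List.foldl_cons, List.foldl_nil,
        ih init (by omega)]
      have hlt : n < init.length := by omega
      have hmap : ((List.range n).map f).length = n := by simp
      rw [List.set_append_right _ _ (by omega), hmap]
      have hd : init.drop n = init[n] :: init.drop (n+1) := List.drop_eq_getElem_cons hlt
      rw [Nat.sub_self, hd, List.set_cons_zero]
      simp

-- A's fold body produces exactly the per-index outputs
lemma aBody_out (arr : List Int) (i : Nat) :
    aWhile arr i i (0, (i : Int)) = (pvOutS arr i, pvOutI arr i) := by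
  rw [aWhile_char arr i i (0, (i : Int))]
  unfold pvOutS pvOutI
  show (if (pvK arr i).1 > 0 then pvK arr i else (0, (i:Int))) = _
  by_cases h : (pvK arr i).1 > 0
  · rw [if_pos h, if_pos h]
    have : max (pvK arr i).1 0 = (pvK arr i).1 := by omega
    rw [this]
  · rw [if_neg h, if_neg h]
    have : max (pvK arr i).1 0 = 0 := by omega
    rw [this]

-- ===== VERDICT (by name: the statement is the Claim_ definition above) =====
theorem obtener_sumas_indice_spec : Claim_equal_obtener_sumas_indice := by
  intro arr _
  unfold Spec_obtener_sumas_indice obtener_sumas_indice obtener_sumas_indice_alt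
  rw [bLoop_eq arr arr 0 0 0 (by simp)
    (by
      intro h
      rw [pvK_zero arr h]
      unfold pvStepK
      simp)]
  simp only []
  rw [foldl_pair_split]
  rw [foldl_set_range (fun i => (aWhile arr i i (0, (i : Int))).1) arr.length _ (by simp)]
  rw [foldl_set_range (fun i => (aWhile arr i i (0, (i : Int))).2) arr.length _ (by simp)]
  rw [List.drop_replicate]
  simp only [Nat.sub_self, List.replicate_zero, List.append_nil]
  rw [List.range_eq_range']
  refine congrArg₂ Prod.mk ?_ ?_
  · apply List.map_congr_left
    intro i _
    rw [aBody_out]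
  · apply List.map_congr_left
    intro i _
    rw [aBody_out]
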